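-- pv_equiv track=rewrite | github.com/MrBrantCode/unitest_baseline | mut_generate/mist_train_cf/cf_39683/solution.py | longestCommonDirectoryPath
-- ===== SOURCE A (Python) =====
-- from typing import List
--
-- def longestCommonDirectoryPath(paths: List[str]) -> str:
--     if not paths:
--         return ""
--
--     split_paths = [path.split("/") for path in paths]
--     min_length = min(len(path) for path in split_paths)
--
--     common_path = ""
--     for i in range(min_length):
--         if all(split_path[i] == split_paths[0][i] for split_path in split_paths):
--             common_path += split_paths[0][i] + "/"
--         else:
--             break
--
--     return common_path.rstrip("/")
-- ===== SOURCE B (Python) =====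
-- from typing import List
--
-- def longestCommonDirectoryPath(paths: List[str]) -> str:
--     if not paths:
--         return ""
--     split_paths = [path.split("/") for path in paths]
--     common = split_paths[0]
--     for sp in split_paths[1:]:
--         keep = []
--         for x, y in zip(common, sp):
--             if x != y:
--                 break
--             keep.append(x)
--         common = keep
--     return "".join(c + "/" for c in common).rstrip("/")
-- ===== Notes on version B (the rewrite author's own statement) =====
-- stated objective: alternative
-- what changed: Replaces A's index loop with an inner all-scan over every split path at each depth by a single fold that pairwise-intersects component lists (common prefix of two lists at a time), so no index arithmetic or min-length pass is needed.
import Mathlib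
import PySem

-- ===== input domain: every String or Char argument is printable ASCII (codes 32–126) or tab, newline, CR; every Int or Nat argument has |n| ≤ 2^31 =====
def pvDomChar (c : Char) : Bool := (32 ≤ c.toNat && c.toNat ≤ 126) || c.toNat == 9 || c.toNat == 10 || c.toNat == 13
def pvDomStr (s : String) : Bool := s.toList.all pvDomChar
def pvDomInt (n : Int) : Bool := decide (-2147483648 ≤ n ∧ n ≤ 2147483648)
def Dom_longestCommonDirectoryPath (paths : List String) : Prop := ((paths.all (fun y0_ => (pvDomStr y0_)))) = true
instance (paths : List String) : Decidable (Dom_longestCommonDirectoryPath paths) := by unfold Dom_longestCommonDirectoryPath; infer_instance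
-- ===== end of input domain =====

-- B replaces A's index loop (with an inner all-scan over every split path at each depth,
-- after a separate min-length pass) by a single fold that pairwise-intersects component
-- lists; objective: alternative decomposition, same asymptotic cost.

-- shared primitive ports of Python expressions both sources use verbatim:
-- path.split("/"): the separator is the nonempty literal "/", so split? is always `some`
def pySplitSlash (p : String) : List String :=
  (PySem.Str.split? p "/").getD []

-- s.rstrip("/"): drop trailing '/' characters (exact for this literal character set)
def rstripSlash (s : String) : String :=
  String.mk ((s.toList.reverse.dropWhile (fun c => c == '/')).reverse)

-- ===== PORT A =====
-- the for-loop over range(min_length) with break, accumulating common_path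
def lcdpLoopA (sps : List (List String)) (fst : List String) : List Nat → String → String
  | [], acc => acc
  | i :: rest, acc =>
    if sps.all (fun sp => sp.getD i "" == fst.getD i "")
    then lcdpLoopA sps fst rest (acc ++ fst.getD i "" ++ "/")
    else acc

def longestCommonDirectoryPath (paths : List String) : String :=
  if paths = [] then ""
  else
    let split_paths := paths.map pySplitSlash
    -- min(len(path) for path in split_paths): min of a nonempty sequence
    let min_length := match split_paths.map List.length with
      | [] => 0   -- unreachable: paths ≠ []
      | l :: ls => ls.foldl Nat.min l
    rstripSlash (lcdpLoopA split_paths (split_paths.headD []) (List.range min_length) "")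

-- ===== PORT B =====
-- the inner zip-walk of Source B: keep components while equal, break at first mismatch
def cp2 (xs ys : List String) : List String :=
  match xs, ys with
  | x :: xs', y :: ys' => if x = y then x :: cp2 xs' ys' else []
  | _, _ => []

def longestCommonDirectoryPath_alt (paths : List String) : String :=
  if paths = [] then ""
  else
    let split_paths := paths.map pySplitSlash
    let common := (split_paths.drop 1).foldl cp2 (split_paths.headD [])
    rstripSlash (String.join (common.map (fun c => c ++ "/")))

-- ===== PRECONDITION & SPEC =====
def Spec_longestCommonDirectoryPath (paths : List String) (out : String) : Prop := out = longestCommonDirectoryPath_alt paths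
instance (paths : List String) (out : String) : Decidable (Spec_longestCommonDirectoryPath paths out) := by unfold Spec_longestCommonDirectoryPath; infer_instance

-- ===== CLAIM (what is proved, stated in full; the proofs are below) =====
def Claim_equal_longestCommonDirectoryPath : Prop := ∀ (paths : List String), Dom_longestCommonDirectoryPath paths → Spec_longestCommonDirectoryPath paths (longestCommonDirectoryPath paths)

-- ===== LEMMAS AND PROOFS =====

-- cp2 computes a common prefix of its two arguments, and a maximal one
theorem cp2_prefix_left (xs ys : List String) : cp2 xs ys <+: xs := by
  induction xs generalizing ys with
  | nil => cases ys <;> simp [cp2]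
  | cons x xs' ih =>
    cases ys with
    | nil => simp [cp2]
    | cons y ys' =>
      simp only [cp2]
      split_ifs with h
      · exact List.cons_prefix_cons.mpr ⟨rfl, ih ys'⟩
      · exact List.nil_prefix

theorem cp2_prefix_right (xs ys : List String) : cp2 xs ys <+: ys := by
  induction xs generalizing ys with
  | nil => cases ys <;> simp [cp2]
  | cons x xs' ih =>
    cases ys with
    | nil => simp [cp2]
    | cons y ys' =>
      simp only [cp2]
      split_ifs with h
      · exact List.cons_prefix_cons.mpr ⟨h.symm ▸ rfl, ih ys'⟩
      · exact List.nil_prefix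

theorem cp2_maximal (xs ys : List String) (n : Nat) (hx : n ≤ xs.length)
    (hy : n ≤ ys.length) (ht : xs.take n = ys.take n) : n ≤ (cp2 xs ys).length := by
  induction xs generalizing ys n with
  | nil =>
    have : n = 0 := by simpa using hx
    simp [this]
  | cons x xs' ih =>
    cases ys with
    | nil =>
      have : n = 0 := by simpa using hy
      simp [this]
    | cons y ys' =>
      cases n with
      | zero => exact Nat.zero_le _
      | succ n' =>
        simp only [List.take_succ_cons, List.cons.injEq] at ht
        simp only [cp2, ht.1, if_true]
        simp only [List.length_cons, Nat.succ_le_succ_iff] at hx hy ⊢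
        exact ih ys' n' hx hy ht.2

-- a prefix agrees with the full list on takes and elements up to its length
theorem prefix_take_eq {α : Type} {a b : List α} (h : a <+: b) (n : Nat) (hn : n ≤ a.length) :
    a.take n = b.take n := by
  obtain ⟨t, rfl⟩ := h
  rw [List.take_append_of_le_length hn]

theorem prefix_getD_eq {a b : List String} (h : a <+: b) (i : Nat) (hi : i < a.length) :
    b.getD i "" = a.getD i "" := by
  obtain ⟨t, rfl⟩ := h
  simp [List.getD_eq_getElem?_getD, List.getElem?_append_left hi]

-- the fold of cp2 is a prefix of its seed and of every folded list, and is maximal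
theorem foldl_cp2_prefix_left (rest : List (List String)) (s0 : List String) :
    rest.foldl cp2 s0 <+: s0 := by
  induction rest generalizing s0 with
  | nil => simp
  | cons y ys ih =>
    exact (ih (cp2 s0 y)).trans (cp2_prefix_left s0 y)

theorem foldl_cp2_prefix_mem (rest : List (List String)) (s0 : List String)
    (sp : List String) (hm : sp ∈ rest) : rest.foldl cp2 s0 <+: sp := by
  induction rest generalizing s0 with
  | nil => cases hm
  | cons y ys ih =>
    rcases List.mem_cons.mp hm with rfl | hm'
    · exact (foldl_cp2_prefix_left ys (cp2 s0 sp)).trans (cp2_prefix_right s0 sp)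
    · exact ih (cp2 s0 y) hm'

theorem foldl_cp2_maximal (rest : List (List String)) (s0 : List String) (n : Nat)
    (h0 : n ≤ s0.length) (hall : ∀ sp ∈ rest, n ≤ sp.length ∧ s0.take n = sp.take n) :
    n ≤ (rest.foldl cp2 s0).length := by
  induction rest generalizing s0 with
  | nil => simpa using h0
  | cons y ys ih =>
    have hy := hall y (List.mem_cons_self)
    have hc : n ≤ (cp2 s0 y).length := cp2_maximal s0 y n h0 hy.1 hy.2
    refine ih (cp2 s0 y) hc (fun sp hsp => ?_)
    have hsp' := hall sp (List.mem_cons_of_mem _ hsp)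
    refine ⟨hsp'.1, ?_⟩
    calc (cp2 s0 y).take n = s0.take n := prefix_take_eq (cp2_prefix_left s0 y) n hc
      _ = sp.take n := hsp'.2

-- min over lengths bounds
theorem le_foldl_min (lens : List Nat) (init n : Nat) (h0 : n ≤ init)
    (hall : ∀ x ∈ lens, n ≤ x) : n ≤ lens.foldl Nat.min init := by
  induction lens generalizing init with
  | nil => simpa using h0
  | cons l ls ih =>
    exact ih (Nat.min init l) (Nat.le_min.mpr ⟨h0, hall l List.mem_cons_self⟩)
      (fun x hx => hall x (List.mem_cons_of_mem _ hx))

theorem foldl_min_le (lens : List Nat) (init : Nat) :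
    (lens.foldl Nat.min init ≤ init) ∧ (∀ x ∈ lens, lens.foldl Nat.min init ≤ x) := by
  induction lens generalizing init with
  | nil => simp
  | cons l ls ih =>
    obtain ⟨h1, h2⟩ := ih (Nat.min init l)
    refine ⟨h1.trans (Nat.min_le_left _ _), fun x hx => ?_⟩
    rcases List.mem_cons.mp hx with rfl | hx'
    · exact h1.trans (Nat.min_le_right _ _)
    · exact h2 x hx'

-- String.join peels one element
theorem string_foldl_append (l : List String) (x y : String) :
    l.foldl (· ++ ·) (x ++ y) = x ++ l.foldl (· ++ ·) y := by
  induction l generalizing y with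
  | nil => simp
  | cons a as ih => simp [List.foldl_cons, String.append_assoc, ih]

theorem string_join_cons (a : String) (l : List String) :
    String.join (a :: l) = a ++ String.join l := by
  simp only [String.join, List.foldl_cons]
  have := string_foldl_append l a ""
  simpa using this

-- the central simulation of A's loop
theorem loopA_eq (sps : List (List String)) (s0 : List String) (m ml : Nat)
    (hml : m ≤ ml)
    (hms : m ≤ s0.length)
    (hagree : ∀ j, j < m → (sps.all (fun sp => sp.getD j "" == s0.getD j "")) = true)
    (hstop : m < ml → (sps.all (fun sp => sp.getD m "" == s0.getD m "")) = false) :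
    ∀ cnt i acc, i + cnt = ml → i ≤ m →
      lcdpLoopA sps s0 (List.range' i cnt) acc
        = acc ++ String.join (((s0.take m).drop i).map (fun c => c ++ "/")) := by
  intro cnt
  induction cnt with
  | zero =>
    intro i acc hi him
    have : i = ml := by omega
    have him' : i = m := by omega
    subst him'
    simp [lcdpLoopA, List.drop_eq_nil_of_le, List.length_take, String.join]
  | succ cnt' ih =>
    intro i acc hi him
    rw [List.range'_succ]
    by_cases hlt : i < m
    · have ha := hagree i hlt
      simp only [lcdpLoopA, ha, if_true]
      rw [ih (i + 1) (acc ++ s0.getD i "" ++ "/") (by omega) (by omega)]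
      have hidx : i < (s0.take m).length := by
        simp [List.length_take]; omega
      have hdrop : (s0.take m).drop i = (s0.take m)[i] :: (s0.take m).drop (i + 1) :=
        (List.drop_eq_getElem_cons hidx)
      rw [hdrop, List.map_cons, string_join_cons]
      have hget : (s0.take m)[i] = s0.getD i "" := by
        rw [List.getElem_take]
        simp [List.getD_eq_getElem?_getD, List.getElem?_eq_getElem (by omega : i < s0.length)]
      rw [hget]
      simp [String.append_assoc]
    · have him' : i = m := by omega
      subst him'
      have ha := hstop (by omega)
      simp only [lcdpLoopA, ha, if_false]
      simp [List.drop_eq_nil_of_le, List.length_take, String.join]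

-- agreement facts for m = (rest.foldl cp2 s0).length over sps = s0 :: rest
theorem agree_lt (s0 : List String) (rest : List (List String))
    (j : Nat) (hj : j < (rest.foldl cp2 s0).length) :
    ((s0 :: rest).all (fun sp => sp.getD j "" == s0.getD j "")) = true := by
  set c := rest.foldl cp2 s0 with hc
  rw [List.all_eq_true]
  intro sp hsp
  rcases List.mem_cons.mp hsp with rfl | hsp'
  · simp
  · have h1 : sp.getD j "" = c.getD j "" := prefix_getD_eq (foldl_cp2_prefix_mem rest s0 sp hsp') j hj
    have h2 : s0.getD j "" = c.getD j "" := prefix_getD_eq (foldl_cp2_prefix_left rest s0) j hj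
    exact beq_iff_eq.mpr (h1.trans h2.symm)

theorem agree_stop (s0 : List String) (rest : List (List String)) (ml : Nat)
    (hml : ml ≤ s0.length) (hmlr : ∀ sp ∈ rest, ml ≤ sp.length)
    (hlt : (rest.foldl cp2 s0).length < ml) :
    ((s0 :: rest).all (fun sp => sp.getD (rest.foldl cp2 s0).length "" == s0.getD (rest.foldl cp2 s0).length "")) = false := by
  set c := rest.foldl cp2 s0 with hc
  set m := c.length with hm
  by_contra hne
  have hall : ∀ sp ∈ s0 :: rest, sp.getD m "" = s0.getD m "" := by
    have := (Bool.not_eq_false _).mp hne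
    rw [List.all_eq_true] at this
    intro sp hsp
    exact beq_iff_eq.mp (this sp hsp)
  -- extend the common prefix by one: contradiction with maximality
  have hsucc : m + 1 ≤ c.length := by
    apply foldl_cp2_maximal rest s0 (m + 1) (by omega)
    intro sp hsp
    have hspl : ml ≤ sp.length := hmlr sp hsp
    refine ⟨by omega, ?_⟩
    have htm : s0.take m = sp.take m := by
      have h1 : c.take m = s0.take m := prefix_take_eq (foldl_cp2_prefix_left rest s0) m (le_refl _)
      have h2 : c.take m = sp.take m := prefix_take_eq (foldl_cp2_prefix_mem rest s0 sp hsp) m (le_refl _)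
      rw [← h1, h2]
    have hs0m : m < s0.length := by omega
    have hspm : m < sp.length := by omega
    rw [List.take_succ, List.take_succ, htm]
    have : sp[m]? = s0[m]? := by
      have := hall sp (List.mem_cons_of_mem _ hsp)
      simp [List.getD_eq_getElem?_getD, List.getElem?_eq_getElem hs0m,
        List.getElem?_eq_getElem hspm] at this ⊢
      exact this
    rw [this]
  omega

-- take of the seed at the fold's length IS the fold
theorem take_foldl_cp2 (s0 : List String) (rest : List (List String)) :
    s0.take (rest.foldl cp2 s0).length = rest.foldl cp2 s0 :=
  ((List.prefix_iff_eq_take.mp (foldl_cp2_prefix_left rest s0)).symm)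

-- ===== VERDICT (by name: the statement is the Claim_ definition above) =====
theorem longestCommonDirectoryPath_spec : Claim_equal_longestCommonDirectoryPath := by
  intro paths _
  unfold Spec_longestCommonDirectoryPath longestCommonDirectoryPath longestCommonDirectoryPath_alt
  by_cases hp : paths = []
  · simp [hp]
  · simp only [hp, if_false]
    obtain ⟨p, ps, rfl⟩ := List.exists_cons_of_ne_nil hp
    simp only [List.map_cons, List.headD_cons, List.drop_succ_cons, List.drop_zero]
    set s0 := pySplitSlash p with hs0
    set rest := ps.map pySplitSlash with hrest
    set c := rest.foldl cp2 s0 with hcdef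
    set m := c.length with hmdef
    set ml := (rest.map List.length).foldl Nat.min s0.length with hmldef
    have hml_le : ml ≤ s0.length ∧ ∀ sp ∈ rest, ml ≤ sp.length := by
      obtain ⟨h1, h2⟩ := foldl_min_le (rest.map List.length) s0.length
      exact ⟨h1, fun sp hsp => h2 sp.length (List.mem_map_of_mem hsp)⟩
    have hm_s0 : m ≤ s0.length := (foldl_cp2_prefix_left rest s0).length_le
    have hm_ml : m ≤ ml := by
      apply le_foldl_min _ _ _ hm_s0
      intro x hx
      obtain ⟨sp, hsp, rfl⟩ := List.mem_map.mp hx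
      exact (foldl_cp2_prefix_mem rest s0 sp hsp).length_le
    have hloop := loopA_eq (s0 :: rest) s0 m ml hm_ml hm_s0
      (fun j hj => agree_lt s0 rest j hj)
      (fun hlt => agree_stop s0 rest ml hml_le.1 hml_le.2 hlt)
      ml 0 "" (by omega) (by omega)
    rw [← List.range_eq_range'] at hloop
    rw [hloop]
    simp only [List.drop_zero]
    rw [take_foldl_cp2 s0 rest]
    congr 1
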